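-- pv_equiv track=rewrite | github.com/ModPunchtree/URCLBot | bCompilerOLD/headers.py | headers
-- ===== SOURCE A (Python) =====
-- def headers(output: list, BITS) -> list:
--     head = []
--
--     head.append("BITS == " + str(BITS))
--
--     regs = [0]
--     for i in output:
--         while i.find("R") != -1:
--             if i[i.find("R") + 1: i.find("R") + 3].isnumeric():
--                 num = int(i[i.find("R") + 1: i.find("R") + 3])
--             elif i[i.find("R") + 1: i.find("R") + 2].isnumeric():
--                 num = int(i[i.find("R") + 1: i.find("R") + 2])
--             else:
--                 num = 0
--             regs.append(num)
--             i = i.replace("R", "$", 1)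
--     REG = str(max(regs))
--     head.append("MINREG " + REG)
--
--     mems = [0]
--     for i in output:
--         while i.find("M") != -1:
--             if i[i.find("M") + 1: i.find("M") + 4].isnumeric():
--                 num = int(i[i.find("M") + 1: i.find("M") + 4])
--             if i[i.find("M") + 1: i.find("M") + 3].isnumeric():
--                 num = int(i[i.find("M") + 1: i.find("M") + 3])
--             elif i[i.find("M") + 1: i.find("M") + 2].isnumeric():
--                 num = int(i[i.find("M") + 1: i.find("M") + 2])
--             else:
--                 num = 0
--             mems.append(num)
--             i = i.replace("M", "#", 1)
--     MEM = str(max(mems))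
--     head.append("MINRAM " + MEM)
--
--     output = head + output
--
--     return output
-- ===== SOURCE B (Python) =====
-- def headers(output: list, BITS) -> list:
--     # Single forward scan per string: at each letter occurrence parse the (up to
--     # two) following digits and keep a running maximum; no find/replace rewriting.
--     def scan(letter):
--         best = 0
--         for s in output:
--             for j, c in enumerate(s):
--                 if c == letter:
--                     t = s[j + 1: j + 3]
--                     if t.isdigit():
--                         best = max(best, int(t))
--                     elif t[:1].isdigit():
--                         best = max(best, int(t[:1]))
--         return best
--     return ["BITS == " + str(BITS),
--             "MINREG " + str(scan("R")),
--             "MINRAM " + str(scan("M"))] + output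
-- ===== Notes on version B (the rewrite author's own statement) =====
-- stated objective: simpler
-- what changed: A repeatedly rewrites each string with find/replace('R','$',1) loops and collects every index (including dummy 0s) into lists that are maxed at the end; B does one left-to-right indexed scan per string per letter, parsing the up-to-two digits after each occurrence and keeping a running maximum, with no string rewriting and no intermediate lists.
import Mathlib
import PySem

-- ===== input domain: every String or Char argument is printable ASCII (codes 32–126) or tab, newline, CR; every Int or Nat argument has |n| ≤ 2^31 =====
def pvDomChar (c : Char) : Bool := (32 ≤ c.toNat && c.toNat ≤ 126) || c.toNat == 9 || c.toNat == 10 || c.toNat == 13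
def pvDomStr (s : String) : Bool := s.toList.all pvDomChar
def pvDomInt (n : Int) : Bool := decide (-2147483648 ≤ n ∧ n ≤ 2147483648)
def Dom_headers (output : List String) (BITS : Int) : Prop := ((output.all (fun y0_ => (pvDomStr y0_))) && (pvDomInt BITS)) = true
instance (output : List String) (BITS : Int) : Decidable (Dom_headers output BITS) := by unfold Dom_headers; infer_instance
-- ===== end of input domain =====

-- B replaces A's repeated find/replace-first rewriting of each string by a single
-- left-to-right indexed scan per string that keeps a running maximum (objective: simpler).

-- ===== PORT A =====

-- i.replace(old, new, 1) for a single-character pattern: replace the first occurrence (exact for 1-char old)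
def pvReplace1 (cs : List Char) (old new : Char) : List Char :=
  match cs with
  | [] => []
  | c :: rest => if c = old then new :: rest else c :: pvReplace1 rest old new

-- termination of A's while-loops: replacing the first `old` strictly lowers its count
theorem pvReplace1_count_lt (old new : Char) (hne : new ≠ old) :
    ∀ cs : List Char, old ∈ cs → (pvReplace1 cs old new).count old < cs.count old := by
  intro cs
  induction cs with
  | nil => intro h; cases h
  | cons c rest ih =>
    intro h
    by_cases hc : c = old
    · subst hc
      have hb1 : (c == new) = false := beq_eq_false_iff_ne.2 (Ne.symm hne)
      have hb2 : (new == c) = false := beq_eq_false_iff_ne.2 hne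
      have hx : (pvReplace1 (c :: rest) c new).count c = rest.count c := by
        simp [pvReplace1, List.count_cons, hb1, hb2]
      have hy : (c :: rest).count c = rest.count c + 1 := by
        simp [List.count_cons]
      rw [hx, hy]
      omega
    · have h2 : old ∈ rest := by
        rcases List.mem_cons.1 h with h | h
        · exact absurd h.symm hc
        · exact h
      have := ih h2
      simp only [pvReplace1, if_neg hc, List.count_cons]
      omega

theorem pvFind_mem {cs : List Char} {c : Char}
    (h : ¬ PySem.Chars.find cs [c] = -1) : c ∈ cs := by
  have hinf := (PySem.Chars.find_ne_neg_one_iff cs [c]).1 h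
  exact hinf.sublist.subset (by simp)

-- A's first while-loop (over one string): while i.find("R") != -1: … regs.append(num); i = i.replace("R","$",1)
def pvLoopR (i : List Char) (regs : List Int) : List Int :=
  if h : PySem.Chars.find i ['R'] = -1 then regs
  else
    let f : Int := PySem.Chars.find i ['R']
    let s2 := PySem.List.slice i (some (f + 1)) (some (f + 3))
    let s1 := PySem.List.slice i (some (f + 1)) (some (f + 2))
    -- str.isnumeric = str.isdigit on the ASCII domain; int() is total on each guarded all-digit slice
    let num : Int :=
      if PySem.Chars.strIsdigit s2 then (PySem.Int.ofChars? s2).getD 0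
      else if PySem.Chars.strIsdigit s1 then (PySem.Int.ofChars? s1).getD 0
      else 0
    pvLoopR (pvReplace1 i 'R' '$') (regs ++ [num])
termination_by i.count 'R'
decreasing_by exact pvReplace1_count_lt 'R' '$' (by decide) i (pvFind_mem h)

-- A's second while-loop: the first `if` assigns num from the 3-char slice; Python then
-- unconditionally reassigns num in the following if/elif/else chain (the let shadows it, as A does)
def pvLoopM (i : List Char) (mems : List Int) : List Int :=
  if h : PySem.Chars.find i ['M'] = -1 then mems
  else
    let f : Int := PySem.Chars.find i ['M']
    let s3 := PySem.List.slice i (some (f + 1)) (some (f + 4))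
    let s2 := PySem.List.slice i (some (f + 1)) (some (f + 3))
    let s1 := PySem.List.slice i (some (f + 1)) (some (f + 2))
    let num : Int :=
      if PySem.Chars.strIsdigit s3 then (PySem.Int.ofChars? s3).getD 0 else 0
    let num : Int :=
      if PySem.Chars.strIsdigit s2 then (PySem.Int.ofChars? s2).getD 0
      else if PySem.Chars.strIsdigit s1 then (PySem.Int.ofChars? s1).getD 0
      else 0
    pvLoopM (pvReplace1 i 'M' '#') (mems ++ [num])
termination_by i.count 'M'
decreasing_by exact pvReplace1_count_lt 'M' '#' (by decide) i (pvFind_mem h)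

def headers (output : List String) (BITS : Int) : List String :=
  let head := ["BITS == " ++ PySem.Int.toStr BITS]
  let regs := output.foldl (fun regs i => pvLoopR i.toList regs) [(0 : Int)]
  -- regs starts as [0], so max() never raises; its value is the getD below
  let REG := PySem.Int.toStr ((PySem.List.max? regs id).getD 0)
  let head := head ++ ["MINREG " ++ REG]
  let mems := output.foldl (fun mems i => pvLoopM i.toList mems) [(0 : Int)]
  let MEM := PySem.Int.toStr ((PySem.List.max? mems id).getD 0)
  let head := head ++ ["MINRAM " ++ MEM]
  head ++ output

-- ===== PORT B =====

-- inner `for j, c in enumerate(s)` loop of Source B's scan: at each letter, s[j+1:j+3] is the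
-- 2-char slice after the current position, i.e. `take 2` of the remaining suffix
def pvScanChars (letter : Char) (cs : List Char) (best : Int) : Int :=
  match cs with
  | [] => best
  | c :: rest =>
    if c = letter then
      let t := rest.take 2
      if PySem.Chars.strIsdigit t then
        pvScanChars letter rest (max best ((PySem.Int.ofChars? t).getD 0))
      else if PySem.Chars.strIsdigit (t.take 1) then
        pvScanChars letter rest (max best ((PySem.Int.ofChars? (t.take 1)).getD 0))
      else pvScanChars letter rest best
    else pvScanChars letter rest best

def pvScan (letter : Char) (output : List String) : Int :=
  output.foldl (fun best s => pvScanChars letter s.toList best) 0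

def headers_alt (output : List String) (BITS : Int) : List String :=
  ["BITS == " ++ PySem.Int.toStr BITS,
   "MINREG " ++ PySem.Int.toStr (pvScan 'R' output),
   "MINRAM " ++ PySem.Int.toStr (pvScan 'M' output)] ++ output

-- ===== PRECONDITION & SPEC =====
def Spec_headers (output : List String) (BITS : Int) (out : List String) : Prop := out = headers_alt output BITS
instance (output : List String) (BITS : Int) (out : List String) : Decidable (Spec_headers output BITS out) := by unfold Spec_headers; infer_instance

-- ===== CLAIM (what is proved, stated in full; the proofs are below) =====
def Claim_equal_headers : Prop := ∀ (output : List String) (BITS : Int), Dom_headers output BITS → Spec_headers output BITS (headers output BITS)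

-- ===== LEMMAS AND PROOFS =====

-- the list of numbers A appends for one string, read off structurally
def pvNums (letter : Char) : List Char → List Int
  | [] => []
  | c :: rest =>
    if c = letter then
      (let t := rest.take 2
       if PySem.Chars.strIsdigit t then (PySem.Int.ofChars? t).getD 0
       else if PySem.Chars.strIsdigit (t.take 1) then (PySem.Int.ofChars? (t.take 1)).getD 0
       else 0) :: pvNums letter rest
    else pvNums letter rest

theorem pvNums_append (letter : Char) (mid tail : List Char) (h : letter ∉ mid) :
    pvNums letter (mid ++ tail) = pvNums letter tail := by
  induction mid with
  | nil => rfl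
  | cons c rest ih =>
    have hc : c ≠ letter := fun hc => h (hc ▸ List.mem_cons_self)
    simp only [List.cons_append, pvNums, if_neg hc]
    exact ih (fun hm => h (List.mem_cons_of_mem _ hm))

theorem pvNums_nil (letter : Char) (cs : List Char) (h : letter ∉ cs) :
    pvNums letter cs = [] := by
  have := pvNums_append letter cs [] h
  simpa using this

theorem pvSplit (c : Char) : ∀ cs : List Char, c ∈ cs →
    ∃ mid rest, cs = mid ++ c :: rest ∧ c ∉ mid := by
  intro cs
  induction cs with
  | nil => intro h; cases h
  | cons x rest ih =>
    intro h
    by_cases hx : x = c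
    · exact ⟨[], rest, by simp [hx], by simp⟩
    · have h2 : c ∈ rest := by
        rcases List.mem_cons.1 h with h | h
        · exact absurd h.symm hx
        · exact h
      obtain ⟨mid, r, rfl, hmid⟩ := ih h2
      exact ⟨x :: mid, r, by simp, by simp [hmid, Ne.symm hx]⟩

theorem pvFind_none {cs : List Char} {c : Char} (h : c ∉ cs) :
    PySem.Chars.find cs [c] = -1 := by
  by_contra hne
  exact h (pvFind_mem hne)

theorem pvFind_eq (pre : List Char) (c : Char) (rest : List Char) (h : c ∉ pre) :
    PySem.Chars.find (pre ++ c :: rest) [c] = (pre.length : Int) := by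
  have hinf : [c] <:+: pre ++ c :: rest := by
    refine ⟨pre, rest, by simp⟩
  have h0 : 0 ≤ PySem.Chars.find (pre ++ c :: rest) [c] :=
    (PySem.Chars.find_nonneg_iff _ _).2 hinf
  obtain ⟨hpref, hmin⟩ := PySem.Chars.find_spec h0
  set k := (PySem.Chars.find (pre ++ c :: rest) [c]).toNat with hk
  have hle : k ≤ pre.length := by
    by_contra h'
    push_neg at h'
    exact hmin pre.length h' ⟨rest, by simp⟩
  have hge : pre.length ≤ k := by
    by_contra h'
    push_neg at h'
    obtain ⟨t, ht⟩ := hpref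
    have hh : (List.drop k (pre ++ c :: rest)).head? = some c := by
      rw [← ht]; rfl
    rw [List.head?_drop] at hh
    have : (pre ++ c :: rest)[k]? = pre[k]? := List.getElem?_append_left h'
    rw [this] at hh
    exact h (List.mem_of_getElem? hh)
  have : k = pre.length := le_antisymm hle hge
  omega

theorem pvSlice (pre : List Char) (c : Char) (rest : List Char) (m : Nat) :
    PySem.List.slice (pre ++ c :: rest) (some ((pre.length : Int) + 1))
      (some ((pre.length : Int) + 1 + (m : Int))) = rest.take m := by
  have h1 : ((pre.length : Int) + 1) = ((pre.length + 1 : Nat) : Int) := by push_cast; ring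
  have h2 : ((pre.length : Int) + 1 + (m : Int)) = ((pre.length + 1 + m : Nat) : Int) := by
    push_cast; ring
  rw [h2, h1, PySem.List.slice_natCast]
  have hdrop : List.drop (pre.length + 1) (pre ++ c :: rest) = rest := by
    have : pre ++ c :: rest = (pre ++ [c]) ++ rest := by simp
    rw [this]
    have hl : (pre ++ [c]).length = pre.length + 1 := by simp
    rw [← hl, List.drop_left]
  rw [hdrop]
  congr 1
  omega

theorem pvReplace1_append (pre : List Char) (c : Char) (rest : List Char) (new : Char)
    (h : c ∉ pre) : pvReplace1 (pre ++ c :: rest) c new = pre ++ new :: rest := by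
  induction pre with
  | nil => simp [pvReplace1]
  | cons x xs ih =>
    have hx : x ≠ c := fun hx => h (hx ▸ List.mem_cons_self)
    simp only [List.cons_append, pvReplace1, if_neg hx]
    rw [ih (fun hm => h (List.mem_cons_of_mem _ hm))]

theorem pvLoopR_eq_aux (n : Nat) : ∀ (cs pre : List Char) (regs : List Int),
    cs.length ≤ n → 'R' ∉ pre → pvLoopR (pre ++ cs) regs = regs ++ pvNums 'R' cs := by
  induction n with
  | zero =>
    intro cs pre regs hlen hpre
    have : cs = [] := List.length_eq_zero_iff.1 (Nat.le_zero.1 hlen)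
    subst this
    rw [pvLoopR]
    simp [pvFind_none (by simpa using hpre), pvNums]
  | succ n ih =>
    intro cs pre regs hlen hpre
    by_cases hmem : 'R' ∈ cs
    · obtain ⟨mid, rest, rfl, hmid⟩ := pvSplit _ _ hmem
      have hpre' : 'R' ∉ pre ++ mid := by simp [hpre, hmid]
      have hassoc : pre ++ (mid ++ 'R' :: rest) = (pre ++ mid) ++ 'R' :: rest := by simp
      rw [hassoc, pvLoopR]
      have hfind := pvFind_eq (pre ++ mid) 'R' rest hpre'
      have hne : ¬ PySem.Chars.find ((pre ++ mid) ++ 'R' :: rest) ['R'] = -1 := by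
        rw [hfind]; omega
      rw [dif_neg hne]
      simp only [hfind]
      have e3 : (((pre ++ mid).length : Int) + 3) = (((pre ++ mid).length : Int) + 1 + (2 : Nat)) := by
        push_cast; ring
      have e2 : (((pre ++ mid).length : Int) + 2) = (((pre ++ mid).length : Int) + 1 + (1 : Nat)) := by
        push_cast; ring
      rw [e3, e2, pvSlice, pvSlice, pvReplace1_append _ _ _ _ hpre']
      have hpre'' : 'R' ∉ (pre ++ mid) ++ ['$'] := by simp [hpre, hmid]
      have hlen' : rest.length ≤ n := by
        have := hlen
        simp only [List.length_append, List.length_cons] at this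
        omega
      have hassoc2 : ((pre ++ mid) ++ '$' :: rest) = ((pre ++ mid) ++ ['$']) ++ rest := by simp
      rw [hassoc2, ih rest _ _ hlen' hpre'']
      rw [pvNums_append 'R' mid _ hmid]
      simp only [pvNums, if_pos rfl]
      have ht1 : (rest.take 2).take 1 = rest.take 1 := by
        rw [List.take_take]; norm_num
      simp [ht1]
    · have hpre' : 'R' ∉ pre ++ cs := by simp [hpre, hmem]
      rw [pvLoopR]
      simp [pvFind_none hpre', pvNums_nil 'R' cs hmem]

theorem pvLoopM_eq_aux (n : Nat) : ∀ (cs pre : List Char) (mems : List Int),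
    cs.length ≤ n → 'M' ∉ pre → pvLoopM (pre ++ cs) mems = mems ++ pvNums 'M' cs := by
  induction n with
  | zero =>
    intro cs pre mems hlen hpre
    have : cs = [] := List.length_eq_zero_iff.1 (Nat.le_zero.1 hlen)
    subst this
    rw [pvLoopM]
    simp [pvFind_none (by simpa using hpre), pvNums]
  | succ n ih =>
    intro cs pre mems hlen hpre
    by_cases hmem : 'M' ∈ cs
    · obtain ⟨mid, rest, rfl, hmid⟩ := pvSplit _ _ hmem
      have hpre' : 'M' ∉ pre ++ mid := by simp [hpre, hmid]
      have hassoc : pre ++ (mid ++ 'M' :: rest) = (pre ++ mid) ++ 'M' :: rest := by simp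
      rw [hassoc, pvLoopM]
      have hfind := pvFind_eq (pre ++ mid) 'M' rest hpre'
      have hne : ¬ PySem.Chars.find ((pre ++ mid) ++ 'M' :: rest) ['M'] = -1 := by
        rw [hfind]; omega
      rw [dif_neg hne]
      simp only [hfind]
      have e3 : (((pre ++ mid).length : Int) + 3) = (((pre ++ mid).length : Int) + 1 + (2 : Nat)) := by
        push_cast; ring
      have e2 : (((pre ++ mid).length : Int) + 2) = (((pre ++ mid).length : Int) + 1 + (1 : Nat)) := by
        push_cast; ring
      rw [e3, e2, pvSlice, pvSlice, pvReplace1_append _ _ _ _ hpre']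
      have hpre'' : 'M' ∉ (pre ++ mid) ++ ['#'] := by simp [hpre, hmid]
      have hlen' : rest.length ≤ n := by
        have := hlen
        simp only [List.length_append, List.length_cons] at this
        omega
      have hassoc2 : ((pre ++ mid) ++ '#' :: rest) = ((pre ++ mid) ++ ['#']) ++ rest := by simp
      rw [hassoc2, ih rest _ _ hlen' hpre'']
      rw [pvNums_append 'M' mid _ hmid]
      simp only [pvNums, if_pos rfl]
      have ht1 : (rest.take 2).take 1 = rest.take 1 := by
        rw [List.take_take]; norm_num
      simp [ht1]
    · have hpre' : 'M' ∉ pre ++ cs := by simp [hpre, hmem]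
      rw [pvLoopM]
      simp [pvFind_none hpre', pvNums_nil 'M' cs hmem]

theorem pvLoopR_eq (cs : List Char) (regs : List Int) :
    pvLoopR cs regs = regs ++ pvNums 'R' cs := by
  have := pvLoopR_eq_aux cs.length cs [] regs le_rfl (by simp)
  simpa using this

theorem pvLoopM_eq (cs : List Char) (mems : List Int) :
    pvLoopM cs mems = mems ++ pvNums 'M' cs := by
  have := pvLoopM_eq_aux cs.length cs [] mems le_rfl (by simp)
  simpa using this

theorem pvScanChars_eq (letter : Char) (cs : List Char) : ∀ b : Int, 0 ≤ b →
    pvScanChars letter cs b = (pvNums letter cs).foldl max b := by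
  induction cs with
  | nil => intro b _; rfl
  | cons c rest ih =>
    intro b hb
    by_cases hc : c = letter
    · simp only [pvScanChars, pvNums, if_pos hc]
      by_cases h2 : PySem.Chars.strIsdigit (rest.take 2)
      · simp only [if_pos h2, List.foldl_cons]
        exact ih _ (le_trans hb (le_max_left _ _))
      · by_cases h1 : PySem.Chars.strIsdigit ((rest.take 2).take 1)
        · simp only [if_neg h2, if_pos h1, List.foldl_cons]
          exact ih _ (le_trans hb (le_max_left _ _))
        · simp only [if_neg h2, if_neg h1, List.foldl_cons]
          rw [max_eq_left hb]
          exact ih _ hb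
    · simp only [pvScanChars, pvNums, if_neg hc]
      exact ih _ hb

theorem pvFoldStep (f : Option Int → Int → Option Int)
    (hf : ∀ m x, f (some m) x = some (max m x)) :
    ∀ (l : List Int) (m : Int), List.foldl f (some m) l = some (l.foldl max m) := by
  intro l
  induction l with
  | nil => intro m; rfl
  | cons x xs ih =>
    intro m
    rw [List.foldl_cons, hf, ih, List.foldl_cons]

theorem pvMax?_cons (a : Int) (l : List Int) :
    PySem.List.max? (a :: l) id = some (l.foldl max a) := by
  show List.foldl _ (some a) l = some (l.foldl max a)
  exact pvFoldStep _ (fun m x => by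
    by_cases h : m < x
    · simp [h, max_eq_right h.le]
    · simp [h, max_eq_left (not_lt.1 h)]) l a

theorem pvFoldMax_nonneg (l : List Int) : ∀ b : Int, 0 ≤ b → 0 ≤ l.foldl max b := by
  induction l with
  | nil => intro b hb; exact hb
  | cons x xs ih =>
    intro b hb
    exact ih _ (le_trans hb (le_max_left _ _))

theorem pvScanFold (letter : Char) (output : List String) : ∀ b : Int, 0 ≤ b →
    output.foldl (fun best s => pvScanChars letter s.toList best) b
      = (output.flatMap (fun s => pvNums letter s.toList)).foldl max b := by
  induction output with
  | nil => intro b _; rfl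
  | cons s rest ih =>
    intro b hb
    simp only [List.foldl_cons, List.flatMap_cons]
    rw [pvScanChars_eq letter s.toList b hb, List.foldl_append]
    exact ih _ (pvFoldMax_nonneg _ _ hb)

theorem pvFoldGen (letter : Char) (loop : List Char → List Int → List Int)
    (hloop : ∀ cs acc, loop cs acc = acc ++ pvNums letter cs) :
    ∀ (output : List String) (acc : List Int),
      output.foldl (fun acc i => loop i.toList acc) acc
        = acc ++ output.flatMap (fun s => pvNums letter s.toList) := by
  intro output
  induction output with
  | nil => intro acc; simp
  | cons t ts ih =>
    intro acc
    rw [List.foldl_cons, hloop, ih, List.flatMap_cons, List.append_assoc]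

theorem pvMaxEq (letter : Char) (output : List String)
    (loop : List Char → List Int → List Int)
    (hloop : ∀ cs acc, loop cs acc = acc ++ pvNums letter cs) :
    (PySem.List.max? (output.foldl (fun acc i => loop i.toList acc) [(0 : Int)]) id).getD 0
      = pvScan letter output := by
  rw [pvFoldGen letter loop hloop output [(0 : Int)]]
  have h0 : ([(0 : Int)] ++ output.flatMap (fun s => pvNums letter s.toList))
      = (0 : Int) :: output.flatMap (fun s => pvNums letter s.toList) := by simp
  rw [h0, pvMax?_cons, Option.getD_some, pvScan, pvScanFold letter output 0 le_rfl]

-- ===== VERDICT (by name: the statement is the Claim_ definition above) =====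
theorem headers_spec : Claim_equal_headers := by
  intro output BITS _
  unfold Spec_headers headers headers_alt
  have hR : (PySem.List.max? (output.foldl (fun regs i => pvLoopR i.toList regs) [(0 : Int)]) id).getD 0
      = pvScan 'R' output := pvMaxEq 'R' output pvLoopR pvLoopR_eq
  have hM : (PySem.List.max? (output.foldl (fun mems i => pvLoopM i.toList mems) [(0 : Int)]) id).getD 0
      = pvScan 'M' output := pvMaxEq 'M' output pvLoopM pvLoopM_eq
  simp only [hR, hM]
  rfl
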